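-- pv_equiv track=rewrite | github.com/mentat-us/HomeProjects | tictactoe/tictactoe.py | is_tictactoe_by_reverse_diagonal
-- ===== SOURCE A (Python) =====
-- TILE_X = 1
--
-- TILE_O = 2
--
-- BOARD_SIZE = 3
--
-- def control(test):
--     for i in range(len(test)):
--         o_counter = 0
--         x_counter = 0
--         for j in range(len(test[i])):
--             if test[i][j] == TILE_O:
--                 o_counter += 1
--             elif test[i][j] == TILE_X:
--                 x_counter += 1
--
--         if o_counter == BOARD_SIZE or x_counter == BOARD_SIZE:
--             return True
--
--     return False
--
-- def is_tictactoe_by_reverse_diagonal(board):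
--     test_r = []
--     for i in range(BOARD_SIZE):
--        test_r.append(board[i][BOARD_SIZE - i - 1])
--
--     test = []
--     test.append(test_r)
--     for k in range(1, BOARD_SIZE):
--         test.append([])
--     return control(test)
-- ===== SOURCE B (Python) =====
-- TILE_X = 1
--
-- TILE_O = 2
--
-- BOARD_SIZE = 3
--
-- def is_tictactoe_by_reverse_diagonal(board):
--     diag = [board[i][BOARD_SIZE - 1 - i] for i in range(BOARD_SIZE)]
--     return all(t == TILE_X for t in diag) or all(t == TILE_O for t in diag)
-- ===== Notes on version B (the rewrite author's own statement) =====
-- stated objective: simpler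
-- what changed: B drops the synthetic padded test-board construction and the generic per-row counting helper, computing the reverse diagonal directly and testing it with a direct all-equal predicate.
import Mathlib
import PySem

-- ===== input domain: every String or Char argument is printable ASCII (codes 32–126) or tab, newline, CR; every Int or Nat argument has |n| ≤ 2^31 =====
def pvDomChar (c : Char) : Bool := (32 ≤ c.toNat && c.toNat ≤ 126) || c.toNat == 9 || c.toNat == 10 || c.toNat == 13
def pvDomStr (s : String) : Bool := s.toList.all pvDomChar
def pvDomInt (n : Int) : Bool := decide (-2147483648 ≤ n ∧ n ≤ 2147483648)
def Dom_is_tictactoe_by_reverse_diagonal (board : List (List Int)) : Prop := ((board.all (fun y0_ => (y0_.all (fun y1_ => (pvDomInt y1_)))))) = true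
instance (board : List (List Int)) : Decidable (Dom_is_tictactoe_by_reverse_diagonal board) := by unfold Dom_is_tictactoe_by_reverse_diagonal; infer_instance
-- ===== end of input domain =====

-- B replaces A's padded test-board construction plus generic counting helper by a direct
-- all-equal predicate over the reverse diagonal (objective: simpler).

-- ===== PORT A =====
-- helper `control`: per-row O/X counters, early return on a full row (early return → recursion)
def pvControlRow (row : List Int) : Int × Int :=
  row.foldl (fun c t => if t == 2 then (c.1 + 1, c.2) else if t == 1 then (c.1, c.2 + 1) else c) (0, 0)

def pvControl : List (List Int) → Bool
  | [] => false
  | r :: rs =>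
    let c := pvControlRow r
    if c.1 == 3 || c.2 == 3 then true else pvControl rs

def is_tictactoe_by_reverse_diagonal (board : List (List Int)) : Bool :=
  -- board[i][...] raises IndexError outside Pre_; pyGetD's default is never used inside Pre_
  let test_r := (PySem.List.pyRange 0 3 1).foldl
    (fun acc i => acc ++ [PySem.List.pyGetD (PySem.List.pyGetD board i []) (3 - i - 1) 0]) []
  let test := [test_r] ++ (PySem.List.pyRange 1 3 1).foldl
    (fun acc _ => acc ++ [([] : List Int)]) []
  pvControl test

-- ===== PORT B =====
def is_tictactoe_by_reverse_diagonal_alt (board : List (List Int)) : Bool :=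
  let diag := (List.range 3).map
    (fun i => PySem.List.pyGetD (PySem.List.pyGetD board (Int.ofNat i) []) (3 - 1 - Int.ofNat i) 0)
  diag.all (fun t => t == 1) || diag.all (fun t => t == 2)

-- ===== PRECONDITION & SPEC =====
-- Pre_: exactly the boards on which Python A's board[i][2-i] lookups (i = 0,1,2) do not raise IndexError
def Pre_is_tictactoe_by_reverse_diagonal (board : List (List Int)) : Prop :=
  3 ≤ board.length ∧ 2 < (board.getD 0 []).length ∧ 1 < (board.getD 1 []).length ∧ 0 < (board.getD 2 []).length
instance (board : List (List Int)) : Decidable (Pre_is_tictactoe_by_reverse_diagonal board) := by unfold Pre_is_tictactoe_by_reverse_diagonal; infer_instance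

def pvWitness_is_tictactoe_by_reverse_diagonal : List (List Int) := [[0, 0, 2], [0, 2, 0], [2, 0, 0]]

def Spec_is_tictactoe_by_reverse_diagonal (board : List (List Int)) (out : Bool) : Prop := out = is_tictactoe_by_reverse_diagonal_alt board
instance (board : List (List Int)) (out : Bool) : Decidable (Spec_is_tictactoe_by_reverse_diagonal board out) := by unfold Spec_is_tictactoe_by_reverse_diagonal; infer_instance

-- ===== CLAIM (what is proved, stated in full; the proofs are below) =====
def Claim_equal_is_tictactoe_by_reverse_diagonal : Prop := ∀ (board : List (List Int)), Dom_is_tictactoe_by_reverse_diagonal board → Pre_is_tictactoe_by_reverse_diagonal board → Spec_is_tictactoe_by_reverse_diagonal board (is_tictactoe_by_reverse_diagonal board)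

-- ===== LEMMAS AND PROOFS =====

-- ===== VERDICT (by name: the statement is the Claim_ definition above) =====
theorem is_tictactoe_by_reverse_diagonal_spec : Claim_equal_is_tictactoe_by_reverse_diagonal := by
  intro board _ hpre
  obtain ⟨h0, h1, h2, h3⟩ := hpre
  match board with
  | (a :: b :: c :: t0) :: (d :: e :: t1) :: (f :: t2) :: rest =>
    show Spec_is_tictactoe_by_reverse_diagonal _ _
    have hr1 : PySem.List.pyRange 0 3 1 = [0, 1, 2] := by decide
    have hr2 : PySem.List.pyRange 1 3 1 = [1, 2] := by decide
    simp only [Spec_is_tictactoe_by_reverse_diagonal, is_tictactoe_by_reverse_diagonal,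
      is_tictactoe_by_reverse_diagonal_alt, hr1, hr2, List.foldl, List.range_succ,
      List.range_zero, List.map, List.all, List.nil_append, List.cons_append]
    norm_num [PySem.List.pyGetD_ofNat', pvControl, pvControlRow]
    split_ifs <;> simp_all
  | [] :: _ => simp at h1
  | [_] :: _ => simp at h1
  | [_, _] :: _ => simp at h1
  | _ :: [] :: _ => simp at h2
  | _ :: [_] :: _ => simp at h2
  | _ :: _ :: [] :: _ => simp at h3
  | [] => simp at h0
  | [_] => simp at h0
  | [_, _] => simp at h0
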